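-- pv_equiv track=rewrite | github.com/costantinoai/chess-expertise-2025 | common/formatters.py | shorten_roi_name
-- ===== SOURCE A (Python) =====
-- def shorten_roi_name(name: str) -> str:
--     """
--     Apply consistent shortening rules to long ROI names for tables.
--
--     Centralizes the ad-hoc replacements previously scattered across scripts.
--     """
--     if name is None:
--         return name
--     out = name.replace('\n', ' ')
--     replacements = {
--         'Paracentral Lobular and Mid Cingulate': 'Paracentral Lob. and Mid Cing.',
--         'Paracentral Lobule and Mid Cingulate': 'Paracentral Lob. and Mid Cing.',
--         'Insular and Frontal Opercular': 'Insular and Frontal Operc.',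
--         'Temporo-Parieto-Occipital Junction': 'Temporo-Parieto-Occipital J.',
--         'Temporo-Parieto Occipital Junction': 'Temporo-Parieto-Occipital J.',
--         'Anterior Cingulate and Medial PFC': 'Anterior Cing. and Medial PFC',
--         'MT+ Complex': 'MT+ Complex Visual',
--     }
--     for k, v in replacements.items():
--         out = out.replace(k, v)
--     return out
-- ===== SOURCE B (Python) =====
-- PAIRS = [
--     ('Paracentral Lobular and Mid Cingulate', 'Paracentral Lob. and Mid Cing.'),
--     ('Paracentral Lobule and Mid Cingulate', 'Paracentral Lob. and Mid Cing.'),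
--     ('Insular and Frontal Opercular', 'Insular and Frontal Operc.'),
--     ('Temporo-Parieto-Occipital Junction', 'Temporo-Parieto-Occipital J.'),
--     ('Temporo-Parieto Occipital Junction', 'Temporo-Parieto-Occipital J.'),
--     ('Anterior Cingulate and Medial PFC', 'Anterior Cing. and Medial PFC'),
--     ('MT+ Complex', 'MT+ Complex Visual'),
-- ]
--
--
-- def shorten_roi_name(name: str) -> str:
--     """Single left-to-right pass: at each position try the shortening table
--     (in order); on a match emit the short form and skip the phrase, else copy
--     the character.  The phrases never overlap, so this equals the sequential
--     full-string replacements."""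
--     if name is None:
--         return name
--     s = name.replace('\n', ' ')
--     out = []
--     i = 0
--     n = len(s)
--     while i < n:
--         for k, v in PAIRS:
--             if s.startswith(k, i):
--                 out.append(v)
--                 i += len(k)
--                 break
--         else:
--             out.append(s[i])
--             i += 1
--     return ''.join(out)
-- ===== Notes on version B (the rewrite author's own statement) =====
-- stated objective: alternative
-- what changed: A makes seven sequential whole-string str.replace passes, one per phrase; B makes a single left-to-right scan that at each position tries the ordered phrase table and emits either the short form (skipping the phrase) or the character, which is equivalent because the phrases never overlap each other or the substituted text.
import Mathlib
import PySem

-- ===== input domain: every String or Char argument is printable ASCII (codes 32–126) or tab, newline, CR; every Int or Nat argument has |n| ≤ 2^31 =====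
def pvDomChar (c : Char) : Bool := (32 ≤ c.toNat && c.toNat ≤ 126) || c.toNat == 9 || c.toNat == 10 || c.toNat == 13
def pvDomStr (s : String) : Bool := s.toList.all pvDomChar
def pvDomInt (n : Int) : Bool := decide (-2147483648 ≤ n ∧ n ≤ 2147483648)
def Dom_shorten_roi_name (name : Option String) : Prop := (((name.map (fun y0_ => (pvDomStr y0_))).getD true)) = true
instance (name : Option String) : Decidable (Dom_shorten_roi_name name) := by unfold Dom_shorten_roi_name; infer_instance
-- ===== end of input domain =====

-- B replaces A's seven sequential whole-string replace passes by one left-to-right scan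
-- over an ordered phrase table (objective: alternative; same return value everywhere).


-- ===== PORT A =====
-- the `replacements` dict of A, as an association list in insertion order
def pvReplacementsA : List (String × String) :=
  [("Paracentral Lobular and Mid Cingulate", "Paracentral Lob. and Mid Cing."),
   ("Paracentral Lobule and Mid Cingulate", "Paracentral Lob. and Mid Cing."),
   ("Insular and Frontal Opercular", "Insular and Frontal Operc."),
   ("Temporo-Parieto-Occipital Junction", "Temporo-Parieto-Occipital J."),
   ("Temporo-Parieto Occipital Junction", "Temporo-Parieto-Occipital J."),
   ("Anterior Cingulate and Medial PFC", "Anterior Cing. and Medial PFC"),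
   ("MT+ Complex", "MT+ Complex Visual")]

def shorten_roi_name (name : Option String) : Option String :=
  match name with
  | none => none
  | some n =>
    some (pvReplacementsA.foldl (fun out kv => PySem.Str.replace out kv.1 kv.2)
      (PySem.Str.replace n "\n" " "))

-- ===== PORT B =====
-- B's PAIRS table, on code points
def pvPairsB : List (List Char × List Char) :=
  [("Paracentral Lobular and Mid Cingulate".toList, "Paracentral Lob. and Mid Cing.".toList),
   ("Paracentral Lobule and Mid Cingulate".toList, "Paracentral Lob. and Mid Cing.".toList),
   ("Insular and Frontal Opercular".toList, "Insular and Frontal Operc.".toList),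
   ("Temporo-Parieto-Occipital Junction".toList, "Temporo-Parieto-Occipital J.".toList),
   ("Temporo-Parieto Occipital Junction".toList, "Temporo-Parieto-Occipital J.".toList),
   ("Anterior Cingulate and Medial PFC".toList, "Anterior Cing. and Medial PFC".toList),
   ("MT+ Complex".toList, "MT+ Complex Visual".toList)]

-- termination fact for the scan: every key of the table is nonempty
lemma pvPairsB_keys_pos : ∀ kv ∈ pvPairsB, 1 ≤ kv.1.length := by decide

-- Source B's while loop: at each position try the pairs in order (s.startswith(k, i)),
-- emit v and skip len(k) on a match, else copy the character
def pvOnePass : List Char → List Char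
  | [] => []
  | c :: t =>
    match h : pvPairsB.find? (fun kv => kv.1.isPrefixOf (c :: t)) with
    | some kv => kv.2 ++ pvOnePass ((c :: t).drop kv.1.length)
    | none => c :: pvOnePass t
termination_by l => l.length
decreasing_by
  · have h1 := pvPairsB_keys_pos _ (List.mem_of_find?_eq_some h)
    simp only [List.length_drop, List.length_cons]
    omega
  · simp

def shorten_roi_name_alt (name : Option String) : Option String :=
  match name with
  | none => none
  | some n => some (String.ofList (pvOnePass (PySem.Str.replace n "\n" " ").toList))

-- ===== PRECONDITION & SPEC =====
def Spec_shorten_roi_name (name : Option String) (out : Option String) : Prop := out = shorten_roi_name_alt name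
instance (name : Option String) (out : Option String) : Decidable (Spec_shorten_roi_name name out) := by unfold Spec_shorten_roi_name; infer_instance

-- ===== CLAIM (what is proved, stated in full; the proofs are below) =====
def Claim_equal_shorten_roi_name : Prop := ∀ (name : Option String), Dom_shorten_roi_name name → Spec_shorten_roi_name name (shorten_roi_name name)

-- ===== LEMMAS AND PROOFS =====

-- prefix-comparability of two strings (one extends the other)
abbrev pvComp (a b : List Char) : Prop := a <+: b ∨ b <+: a

-- clean recursion computing Python's s.replace(k, v) for k ≠ '' (leftmost,
-- non-overlapping); proved equal to PySem.Chars.replace below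
def pvRep (k v : List Char) (l : List Char) : List Char :=
  if h : k ≠ [] ∧ k.isPrefixOf l then v ++ pvRep k v (l.drop k.length)
  else
    match l with
    | [] => []
    | c :: t => c :: pvRep k v t
termination_by l.length
decreasing_by
  · have hp := (List.isPrefixOf_iff_prefix.mp h.2).length_le
    have hk : k ≠ [] := h.1
    have : 0 < k.length := by cases k <;> simp_all
    simp only [List.length_drop]
    omega
  · simp

lemma pvRep_nil (k v : List Char) : pvRep k v [] = [] := by
  conv_lhs => rw [pvRep]
  rw [dif_neg (fun h => h.1 (List.prefix_nil.mp (List.isPrefixOf_iff_prefix.mp h.2)))]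

lemma pvRep_cons (k v : List Char) (c : Char) (t : List Char)
    (hn : ¬ (k ≠ [] ∧ k <+: (c :: t))) : pvRep k v (c :: t) = c :: pvRep k v t := by
  conv_lhs => rw [pvRep]
  rw [dif_neg (by simpa [List.isPrefixOf_iff_prefix] using hn)]

lemma pvRep_pref (k v l : List Char) (hk : k ≠ []) (hp : k <+: l) :
    pvRep k v l = v ++ pvRep k v (l.drop k.length) := by
  conv_lhs => rw [pvRep]
  rw [dif_pos ⟨hk, List.isPrefixOf_iff_prefix.mpr hp⟩]

lemma pvGo_eq (old new : List Char) (hold : old ≠ []) :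
    ∀ (fuel : Nat) (l acc : List Char), l.length ≤ fuel →
      PySem.Chars.replace.go old new fuel l acc = acc.reverse ++ pvRep old new l := by
  intro fuel
  induction fuel with
  | zero =>
    intro l acc hl
    have : l = [] := by cases l <;> simp_all
    subst this
    simp [PySem.Chars.replace.go, pvRep_nil]
  | succ fuel ih =>
    intro l acc hl
    cases l with
    | nil => simp [PySem.Chars.replace.go, pvRep_nil]
    | cons c t =>
      by_cases hp : old.isPrefixOf (c :: t)
      · have hpf := List.isPrefixOf_iff_prefix.mp hp
        have hlen : 0 < old.length := by cases old <;> simp_all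
        rw [show PySem.Chars.replace.go old new (fuel+1) (c::t) acc
              = PySem.Chars.replace.go old new fuel ((c::t).drop old.length) (new.reverse ++ acc) by
            simp [PySem.Chars.replace.go, hp]]
        have hfl : ((c :: t).drop old.length).length ≤ fuel := by
          simp only [List.length_drop, List.length_cons]
          simp only [List.length_cons] at hl
          omega
        rw [ih _ _ hfl]
        rw [pvRep_pref old new (c::t) hold hpf]
        simp
      · rw [show PySem.Chars.replace.go old new (fuel+1) (c::t) acc
              = PySem.Chars.replace.go old new fuel t (c :: acc) by
            simp [PySem.Chars.replace.go, hp]]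
        rw [ih t (c :: acc) (by simp only [List.length_cons] at hl; omega)]
        rw [pvRep_cons old new c t (fun h => hp (List.isPrefixOf_iff_prefix.mpr h.2))]
        simp

lemma pvReplace_eq (s old new : List Char) (hold : old ≠ []) :
    PySem.Chars.replace s old new = pvRep old new s := by
  unfold PySem.Chars.replace
  rw [if_neg (by simpa using hold)]
  simpa using pvGo_eq old new hold s.length s [] le_rfl

-- the sequential pass of A: foldl of pvRep over the table
def pvSeq (ps : List (List Char × List Char)) (s : List Char) : List Char :=
  ps.foldl (fun s kv => pvRep kv.1 kv.2 s) s

lemma pvSeq_cons (kv : List Char × List Char) (ps : List (List Char × List Char)) (s : List Char) :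
    pvSeq (kv :: ps) s = pvSeq ps (pvRep kv.1 kv.2 s) := rfl

lemma pvSeq_append (l₁ l₂ : List (List Char × List Char)) (s : List Char) :
    pvSeq (l₁ ++ l₂) s = pvSeq l₂ (pvSeq l₁ s) := by
  simp [pvSeq, List.foldl_append]

lemma pvSeq_nil_str : ∀ ps, pvSeq ps [] = [] := by
  intro ps
  induction ps with
  | nil => rfl
  | cons kv ps ih => rw [pvSeq_cons, pvRep_nil]; exact ih

lemma pvPrefSplit (p a x : List Char) (h : p <+: a ++ x) : p <+: a ∨ a <+: p :=
  List.prefix_or_prefix_of_prefix h (List.prefix_append a x)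

-- PULL: a prefix of "t with k→v replaced" that cannot overlap v is a prefix of t
lemma pvPull (k v : List Char) :
    ∀ (N : Nat) (t p : List Char), t.length ≤ N →
      (∀ q, q <:+ p → q ≠ [] → ¬ pvComp q v) → p <+: pvRep k v t → p <+: t := by
  intro N
  induction N with
  | zero =>
    intro t p ht _ hp
    have : t = [] := by cases t <;> simp_all
    subst this
    rwa [pvRep_nil] at hp
  | succ N ih =>
    intro t p ht hq hp
    by_cases hg : k ≠ [] ∧ k <+: t
    · rw [pvRep_pref k v t hg.1 hg.2] at hp
      rcases eq_or_ne p [] with rfl | hpne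
      · exact List.nil_prefix
      · rcases pvPrefSplit p v _ hp with h | h
        · exact absurd (Or.inl h) (hq p (List.suffix_refl p) hpne)
        · exact absurd (Or.inr h) (hq p (List.suffix_refl p) hpne)
    · cases t with
      | nil => rwa [pvRep_nil] at hp
      | cons c t' =>
        rw [pvRep_cons k v c t' hg] at hp
        cases p with
        | nil => exact List.nil_prefix
        | cons d p' =>
          rw [List.cons_prefix_cons] at hp ⊢
          obtain ⟨rfl, hp'⟩ := hp
          refine ⟨rfl, ih t' p' (by simp at ht; omega) ?_ hp'⟩
          intro q hq' hqne
          exact hq q (hq'.trans (List.suffix_cons d p')) hqne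

-- NO-MATCH CASE: if no key matches at the front, the whole sequential pass keeps the head
lemma pvFrontCons : ∀ (ps : List (List Char × List Char)) (c : Char) (t : List Char),
    List.Pairwise (fun a b => ∀ q, q <:+ b.1 → q ≠ [] → ¬ pvComp q a.2) ps →
    (∀ kv ∈ ps, ¬ kv.1 <+: (c :: t)) →
    pvSeq ps (c :: t) = c :: pvSeq ps t := by
  intro ps
  induction ps with
  | nil => intro c t _ _; rfl
  | cons kv ps ih =>
    intro c t hpw hnp
    rw [List.pairwise_cons] at hpw
    have h1 : ¬ kv.1 <+: (c :: t) := hnp kv (by simp)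
    have e1 : pvRep kv.1 kv.2 (c :: t) = c :: pvRep kv.1 kv.2 t :=
      pvRep_cons _ _ _ _ (fun h => h1 h.2)
    have hnp' : ∀ kv' ∈ ps, ¬ kv'.1 <+: (c :: pvRep kv.1 kv.2 t) := by
      intro kv' hm hpref
      cases hk' : kv'.1 with
      | nil => exact hnp kv' (by simp [hm]) (hk' ▸ List.nil_prefix)
      | cons d p =>
        rw [hk', List.cons_prefix_cons] at hpref
        obtain ⟨rfl, hp⟩ := hpref
        have hsub : p <+: t := pvPull kv.1 kv.2 t.length t p le_rfl
          (fun q hq hqne => hpw.1 kv' hm q (by rw [hk']; exact hq.trans (List.suffix_cons d p)) hqne) hp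
        exact hnp kv' (by simp [hm]) (by rw [hk']; exact List.cons_prefix_cons.mpr ⟨rfl, hsub⟩)
    rw [pvSeq_cons, e1, ih c _ hpw.2 hnp', pvSeq_cons]

lemma pvRepAppend (k v : List Char) : ∀ (a x : List Char),
    (∀ n, n < a.length → ¬ k <+: (a.drop n ++ x)) → pvRep k v (a ++ x) = a ++ pvRep k v x := by
  intro a
  induction a with
  | nil => intro x _; simp
  | cons c a' ih =>
    intro x hn
    have h0 : ¬ k <+: (c :: (a' ++ x)) := by simpa using hn 0 (by simp)
    rw [List.cons_append, pvRep_cons _ _ _ _ (fun h => h0 h.2),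
      ih x (fun n hlt => by simpa using hn (n+1) (by simp; omega))]
    rfl

-- MATCH CASE: a front block none of whose positions starts a key occurrence is kept
lemma pvKeepFront : ∀ (ps : List (List Char × List Char)) (a x : List Char),
    List.Pairwise (fun p q => ∀ s, s <:+ q.1 → s ≠ [] → ¬ pvComp s p.2) ps →
    (∀ kv ∈ ps, ∀ n, n < a.length → ¬ kv.1 <+: (a.drop n ++ x)) →
    pvSeq ps (a ++ x) = a ++ pvSeq ps x := by
  intro ps
  induction ps with
  | nil => intro a x _ _; rfl
  | cons kv ps ih =>
    intro a x hpw ha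
    rw [List.pairwise_cons] at hpw
    have e1 : pvRep kv.1 kv.2 (a ++ x) = a ++ pvRep kv.1 kv.2 x :=
      pvRepAppend _ _ a x (fun n hlt => ha kv (by simp) n hlt)
    have ha' : ∀ kv' ∈ ps, ∀ n, n < a.length → ¬ kv'.1 <+: (a.drop n ++ pvRep kv.1 kv.2 x) := by
      intro kv' hm n hlt hpref
      rcases pvPrefSplit _ _ _ hpref with h | h
      · exact ha kv' (by simp [hm]) n hlt (h.trans (List.prefix_append _ _))
      · obtain ⟨ext, hext⟩ := h
        have hext_pref : ext <+: pvRep kv.1 kv.2 x := by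
          rw [← hext] at hpref
          exact (List.prefix_append_right_inj _).mp hpref
        have hext_sfx : ext <:+ kv'.1 := hext ▸ List.suffix_append _ _
        have hx : ext <+: x := pvPull kv.1 kv.2 x.length x ext le_rfl
          (fun q hq hqne => hpw.1 kv' hm q (hq.trans hext_sfx) hqne) hext_pref
        exact ha kv' (by simp [hm]) n hlt
          (by rw [← hext]; exact (List.prefix_append_right_inj _).mpr hx)
    rw [pvSeq_cons, e1, ih a _ hpw.2 ha', pvSeq_cons]

-- the decidable non-interference facts about the concrete table
lemma pvC1 : List.Pairwise (fun a b => ∀ q ∈ b.1.tails, q ≠ [] → ¬ pvComp q a.2) pvPairsB := by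
  decide

lemma pvC1' : List.Pairwise (fun a b => ∀ q, q <:+ b.1 → q ≠ [] → ¬ pvComp q a.2) pvPairsB :=
  pvC1.imp (fun h q hq => h q ((List.mem_tails _ _).mpr hq))

lemma pvKK : ∀ a ∈ pvPairsB, ∀ b ∈ pvPairsB,
    ∀ n, n < a.1.length → 0 < n → ¬ pvComp (a.1.drop n) b.1 := by decide

lemma pvKV : List.Pairwise (fun a b => ∀ n, n < a.2.length → ¬ pvComp (a.2.drop n) b.1) pvPairsB := by
  decide

lemma pvKne : ∀ kv ∈ pvPairsB, kv.1 ≠ [] := by decide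

lemma pvOnePass_nil : pvOnePass [] = [] := by simp [pvOnePass]

lemma pvOnePass_cons_none (c : Char) (t : List Char)
    (h : pvPairsB.find? (fun kv => kv.1.isPrefixOf (c :: t)) = none) :
    pvOnePass (c :: t) = c :: pvOnePass t := by
  rw [pvOnePass]
  split
  · next kv heq => rw [h] at heq; cases heq
  · rfl

lemma pvOnePass_cons_some (c : Char) (t : List Char) (kv : List Char × List Char)
    (h : pvPairsB.find? (fun kv => kv.1.isPrefixOf (c :: t)) = some kv) :
    pvOnePass (c :: t) = kv.2 ++ pvOnePass ((c :: t).drop kv.1.length) := by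
  rw [pvOnePass]
  split
  · next kv' heq => rw [h] at heq; cases heq; rfl
  · next heq => rw [h] at heq; cases heq

-- MAIN: the sequential pass equals the single scan
lemma pvMain : ∀ (N : Nat) (l : List Char), l.length ≤ N → pvSeq pvPairsB l = pvOnePass l := by
  intro N
  induction N with
  | zero =>
    intro l hl
    have : l = [] := by cases l <;> simp_all
    subst this
    rw [pvSeq_nil_str, pvOnePass_nil]
  | succ N ih =>
    intro l hl
    cases l with
    | nil => rw [pvSeq_nil_str, pvOnePass_nil]
    | cons c t =>
      cases hfind : pvPairsB.find? (fun kv => kv.1.isPrefixOf (c :: t)) with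
      | none =>
        have hall : ∀ kv ∈ pvPairsB, ¬ kv.1 <+: (c :: t) := by
          intro kv hm hp
          have := List.find?_eq_none.mp hfind kv hm
          simp [List.isPrefixOf_iff_prefix] at this
          exact this hp
        rw [pvFrontCons pvPairsB c t pvC1' hall, ih t (by simp at hl; omega),
          pvOnePass_cons_none c t hfind]
      | some kv =>
        obtain ⟨hpb, L₁, L₂, hsplit, hmin⟩ := List.find?_eq_some_iff_append.mp hfind
        have hpref : kv.1 <+: (c :: t) := List.isPrefixOf_iff_prefix.mp hpb
        obtain ⟨r, hr⟩ := hpref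
        have hkv_mem : kv ∈ pvPairsB := by rw [hsplit]; simp
        have hkne := pvKne kv hkv_mem
        have hklen : 0 < kv.1.length := by cases hk : kv.1 <;> simp_all
        -- pieces of the pairwise facts for the split pvPairsB = L₁ ++ kv :: L₂
        have hpwAll := pvC1'
        rw [hsplit] at hpwAll
        have hpw1 := (List.pairwise_append.mp hpwAll).1
        have hpwR := (List.pairwise_append.mp hpwAll).2.1
        rw [List.pairwise_cons] at hpwR
        have hpw2 := hpwR.2
        have hkvA := pvKV
        rw [hsplit] at hkvA
        have hkv2 := (List.pairwise_cons.mp (List.pairwise_append.mp hkvA).2.1).1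
        -- step (a): the L₁ passes keep the matched key at the front
        have e1 : pvSeq L₁ (kv.1 ++ r) = kv.1 ++ pvSeq L₁ r := by
          apply pvKeepFront L₁ kv.1 r hpw1
          intro kv' hm n hlt hp
          have hm' : kv' ∈ pvPairsB := by rw [hsplit]; simp [hm]
          cases n with
          | zero =>
            simp only [List.drop_zero] at hp
            rw [hr] at hp
            have hnot := hmin kv' hm
            have hyes : kv'.1.isPrefixOf (c :: t) = true := List.isPrefixOf_iff_prefix.mpr hp
            simp [hyes] at hnot
          | succ m =>
            rcases pvPrefSplit _ _ _ hp with h | h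
            · exact pvKK kv hkv_mem kv' hm' (m+1) hlt (Nat.succ_pos m) (Or.inr h)
            · exact pvKK kv hkv_mem kv' hm' (m+1) hlt (Nat.succ_pos m) (Or.inl h)
        -- step (b): the kv pass replaces the front occurrence
        have e2 : pvRep kv.1 kv.2 (kv.1 ++ pvSeq L₁ r)
            = kv.2 ++ pvRep kv.1 kv.2 (pvSeq L₁ r) := by
          rw [pvRep_pref _ _ _ hkne (List.prefix_append _ _), List.drop_left]
        -- step (c): the L₂ passes keep the substituted text at the front
        have e3 : pvSeq L₂ (kv.2 ++ pvRep kv.1 kv.2 (pvSeq L₁ r))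
            = kv.2 ++ pvSeq L₂ (pvRep kv.1 kv.2 (pvSeq L₁ r)) := by
          apply pvKeepFront L₂ kv.2 _ hpw2
          intro kv' hm n hlt hp
          rcases pvPrefSplit _ _ _ hp with h | h
          · exact hkv2 kv' hm n hlt (Or.inr h)
          · exact hkv2 kv' hm n hlt (Or.inl h)
        have hrlen : r.length ≤ N := by
          have hlc := congrArg List.length hr
          simp only [List.length_append, List.length_cons] at hlc
          simp only [List.length_cons] at hl
          omega
        have hdrop : (c :: t).drop kv.1.length = r := by
          rw [← hr, List.drop_left]
        calc pvSeq pvPairsB (c :: t)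
            = pvSeq L₂ (pvRep kv.1 kv.2 (pvSeq L₁ (kv.1 ++ r))) := by
              rw [hsplit, ← hr, pvSeq_append, pvSeq_cons]
          _ = kv.2 ++ pvSeq L₂ (pvRep kv.1 kv.2 (pvSeq L₁ r)) := by rw [e1, e2, e3]
          _ = kv.2 ++ pvSeq pvPairsB r := by rw [hsplit, pvSeq_append, pvSeq_cons]
          _ = kv.2 ++ pvOnePass r := by rw [ih r hrlen]
          _ = pvOnePass (c :: t) := by rw [pvOnePass_cons_some c t kv hfind, hdrop]

-- ===== VERDICT (by name: the statement is the Claim_ definition above) =====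
theorem shorten_roi_name_spec : Claim_equal_shorten_roi_name := by
  unfold Claim_equal_shorten_roi_name
  intro name _
  unfold Spec_shorten_roi_name
  cases name with
  | none => rfl
  | some n =>
    unfold shorten_roi_name shorten_roi_name_alt
    apply congrArg some
    apply String.toList_inj.mp
    simp only [pvReplacementsA, List.foldl_cons, List.foldl_nil, PySem.Str.toList_replace,
      String.toList_ofList]
    rw [pvReplace_eq _ _ _ (by decide), pvReplace_eq _ _ _ (by decide),
      pvReplace_eq _ _ _ (by decide), pvReplace_eq _ _ _ (by decide),
      pvReplace_eq _ _ _ (by decide), pvReplace_eq _ _ _ (by decide),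
      pvReplace_eq _ _ _ (by decide)]
    exact pvMain _ _ le_rfl
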